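-- pv_equiv track=rewrite | github.com/Nokturnalmor/Terminal_sozd_new | FCN.py | parametr_iz_akta
-- ===== SOURCE A (Python) =====
-- def parametr_iz_akta(sroka,ima):
--     arr_br = sroka.split('|')
--     flag = 0
--     for i in arr_br:
--         if ima in i:
--             flag = 1
--             rez = i.replace(ima,"")
--     if flag == 1:
--         return rez
--     else:
--         return ""
-- ===== SOURCE B (Python) =====
-- def parametr_iz_akta(sroka, ima):
--     best = None
--     cur = ""
--     for ch in sroka + "|":
--         if ch == "|":
--             if ima in cur:
--                 best = cur
--             cur = ""
--         else:
--             cur += ch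
--     return best.replace(ima, "") if best is not None else ""
-- ===== Notes on version B (the rewrite author's own statement) =====
-- stated objective: alternative
-- what changed: B removes the split('|') entirely: a single character-level streaming pass over sroka+'|' maintains the current segment buffer and the best (last) matching segment, instead of A's split-then-scan over the segment list with a flag.
import Mathlib
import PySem

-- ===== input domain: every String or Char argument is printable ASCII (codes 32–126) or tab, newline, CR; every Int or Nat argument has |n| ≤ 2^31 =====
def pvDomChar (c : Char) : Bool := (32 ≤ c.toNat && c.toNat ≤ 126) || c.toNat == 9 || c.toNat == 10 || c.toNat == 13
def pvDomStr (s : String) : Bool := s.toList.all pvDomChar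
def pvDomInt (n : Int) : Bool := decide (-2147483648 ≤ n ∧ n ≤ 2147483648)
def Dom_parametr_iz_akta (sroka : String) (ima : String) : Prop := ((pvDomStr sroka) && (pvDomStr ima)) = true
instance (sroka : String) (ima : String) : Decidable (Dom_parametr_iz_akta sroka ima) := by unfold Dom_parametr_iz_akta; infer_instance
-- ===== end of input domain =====

-- B replaces A's split('|')-then-scan-with-flag by a single character-level streaming pass over sroka+'|'
-- maintaining the current segment buffer and the best (last) matching segment (objective: alternative).

-- ===== PORT A =====
-- A: arr_br = sroka.split('|'); forward loop with flag and rez overwritten on every match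
def parametr_iz_akta (sroka : String) (ima : String) : String :=
  let arr_br := PySem.Chars.splitOn sroka.toList ['|']
  let st := arr_br.foldl
    (fun (st : Int × List Char) i =>
      if PySem.Chars.isIn ima.toList i then (1, PySem.Chars.replace i ima.toList []) else st)
    (0, [])
  if st.1 = 1 then String.ofList st.2 else ""

-- ===== PORT B =====
-- B: one pass over the characters of sroka + "|"; cur is the segment buffer, best the last matching segment
def parametr_iz_akta_alt (sroka : String) (ima : String) : String :=
  let st := (sroka.toList ++ ['|']).foldl
    (fun (st : Option (List Char) × List Char) ch =>
      if ch = '|' then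
        (if PySem.Chars.isIn ima.toList st.2 then some st.2 else st.1, [])
      else
        (st.1, st.2 ++ [ch]))
    (none, [])
  match st.1 with
  | some b => String.ofList (PySem.Chars.replace b ima.toList [])
  | none => ""

-- ===== PRECONDITION & SPEC =====
def Spec_parametr_iz_akta (sroka : String) (ima : String) (out : String) : Prop := out = parametr_iz_akta_alt sroka ima
instance (sroka : String) (ima : String) (out : String) : Decidable (Spec_parametr_iz_akta sroka ima out) := by unfold Spec_parametr_iz_akta; infer_instance

-- ===== CLAIM (what is proved, stated in full; the proofs are below) =====
def Claim_equal_parametr_iz_akta : Prop := ∀ (sroka : String) (ima : String), Dom_parametr_iz_akta sroka ima → Spec_parametr_iz_akta sroka ima (parametr_iz_akta sroka ima)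

-- ===== LEMMAS AND PROOFS =====

-- structural single-character split (proof-side reference model)
def pvSplit : List Char → List (List Char)
  | [] => [[]]
  | c :: rest =>
    if c = '|' then [] :: pvSplit rest
    else
      match pvSplit rest with
      | h :: t => (c :: h) :: t
      | [] => [[c]]

theorem pvSplit_ne_nil (l : List Char) : pvSplit l ≠ [] := by
  cases l with
  | nil => simp [pvSplit]
  | cons c rest =>
    simp only [pvSplit]
    split_ifs
    · simp
    · cases h : pvSplit rest <;> simp

def pvGlue (pre : List Char) : List (List Char) → List (List Char)
  | h :: t => (pre ++ h) :: t
  | [] => [pre]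

theorem pv_go_eq (fuel : Nat) (l cur : List Char) (acc : List (List Char))
    (h : l.length ≤ fuel) :
    PySem.Chars.splitOn.go ['|'] fuel l cur acc
      = acc.reverse ++ pvGlue cur.reverse (pvSplit l) := by
  induction fuel generalizing l cur acc with
  | zero =>
    have : l = [] := by cases l <;> simp_all
    subst this
    simp [PySem.Chars.splitOn.go, pvSplit, pvGlue]
  | succ fuel ih =>
    cases l with
    | nil => simp [PySem.Chars.splitOn.go, pvSplit, pvGlue]
    | cons c rest =>
      by_cases hc : c = '|'
      · subst hc
        rw [show PySem.Chars.splitOn.go ['|'] (fuel+1) ('|' :: rest) cur acc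
              = PySem.Chars.splitOn.go ['|'] fuel rest [] (cur.reverse :: acc) by
            simp [PySem.Chars.splitOn.go, List.isPrefixOf]]
        rw [ih rest [] (cur.reverse :: acc) (by simpa using Nat.le_of_succ_le_succ h)]
        rcases hs : pvSplit rest with _ | ⟨hd, tl⟩
        · exact absurd hs (pvSplit_ne_nil rest)
        · simp [pvSplit, hs, pvGlue]
      · rw [show PySem.Chars.splitOn.go ['|'] (fuel+1) (c :: rest) cur acc
              = PySem.Chars.splitOn.go ['|'] fuel rest (c :: cur) acc by
            simp [PySem.Chars.splitOn.go, List.isPrefixOf, Ne.symm hc]]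
        rw [ih rest (c :: cur) acc (by simpa using Nat.le_of_succ_le_succ h)]
        simp only [pvSplit, hc, if_false, List.reverse_cons]
        rcases hs : pvSplit rest with _ | ⟨hd, tl⟩
        · exact absurd hs (pvSplit_ne_nil rest)
        · simp [pvGlue]

theorem pv_splitOn_eq (s : List Char) :
    PySem.Chars.splitOn s ['|'] = pvSplit s := by
  rw [PySem.Chars.splitOn, pv_go_eq (s.length + 1) s [] [] (by omega)]
  rcases hs : pvSplit s with _ | ⟨hd, tl⟩
  · exact absurd hs (pvSplit_ne_nil s)
  · simp [pvGlue]

-- the segment-level "last match" fold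
def pvProc (ima : List Char) (b : Option (List Char)) (segs : List (List Char)) : Option (List Char) :=
  segs.foldl (fun b seg => if PySem.Chars.isIn ima seg then some seg else b) b

-- B's character fold over s ++ ['|'] computes pvProc over the segments of s
theorem pv_char_fold (ima : List Char) (s : List Char) (best : Option (List Char)) (cur : List Char) :
    ((s ++ ['|']).foldl
      (fun (st : Option (List Char) × List Char) ch =>
        if ch = '|' then
          (if PySem.Chars.isIn ima st.2 then some st.2 else st.1, [])
        else
          (st.1, st.2 ++ [ch]))
      (best, cur)).1
    = pvProc ima best (pvGlue cur (pvSplit s)) := by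
  induction s generalizing best cur with
  | nil => simp [pvProc, pvSplit, pvGlue]
  | cons c rest ih =>
    by_cases hc : c = '|'
    · subst hc
      simp only [List.cons_append, List.foldl_cons]
      rw [ih]
      rcases hs : pvSplit rest with _ | ⟨hd, tl⟩
      · exact absurd hs (pvSplit_ne_nil rest)
      · simp [pvSplit, hs, pvGlue, pvProc]
    · simp only [List.cons_append, List.foldl_cons, if_neg hc]
      rw [ih]
      rcases hs : pvSplit rest with _ | ⟨hd, tl⟩
      · exact absurd hs (pvSplit_ne_nil rest)
      · simp [pvSplit, hc, hs, pvGlue]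

-- A's flag/rez fold over segments encodes pvProc
def pvEnc (ima : List Char) : Option (List Char) → Int × List Char
  | none => (0, [])
  | some seg => (1, PySem.Chars.replace seg ima [])

theorem pv_a_fold (ima : List Char) (segs : List (List Char)) (b : Option (List Char)) :
    segs.foldl
      (fun (st : Int × List Char) i =>
        if PySem.Chars.isIn ima i then (1, PySem.Chars.replace i ima []) else st)
      (pvEnc ima b)
    = pvEnc ima (pvProc ima b segs) := by
  induction segs generalizing b with
  | nil => simp [pvProc]
  | cons seg rest ih =>
    simp only [List.foldl_cons, pvProc, List.foldl_cons] at *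
    by_cases h : PySem.Chars.isIn ima seg = true
    · simpa [h, pvEnc] using ih (some seg)
    · simp only [Bool.not_eq_true] at h
      simpa [h] using ih b

-- ===== VERDICT (by name: the statement is the Claim_ definition above) =====
theorem parametr_iz_akta_spec : Claim_equal_parametr_iz_akta := by
  intro sroka ima _
  unfold Spec_parametr_iz_akta parametr_iz_akta parametr_iz_akta_alt
  rcases hs : pvSplit sroka.toList with _ | ⟨hd, tl⟩
  · exact absurd hs (pvSplit_ne_nil sroka.toList)
  · have hB := pv_char_fold ima.toList sroka.toList none []
    rw [hs] at hB
    simp only [pvGlue, List.nil_append] at hB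
    have hA := pv_a_fold ima.toList (hd :: tl) none
    simp only [pvEnc] at hA
    simp only [pv_splitOn_eq, hs, hA, hB]
    cases pvProc ima.toList none (hd :: tl) with
    | none => simp
    | some seg => simp
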